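-- pv_equiv track=rewrite | github.com/gl-coding/videoMerger | libpy/fix_srt.py | get_combined_segments
-- ===== SOURCE A (Python) =====
-- def get_combined_segments(segments, position, max_combine=3):
--     """获取不同组合的前后句拼接结果"""
--     combinations = []
--     n = len(segments)
--     idx = position - 1  # 转换为0基索引
--
--     # 获取基准文本
--     base_text = segments[idx]
--     combinations.append(('base', base_text))
--
--     # 向前拼接1-3句
--     for i in range(1, max_combine + 1):
--         start = max(0, idx - i)
--         combined = ''.join(segments[start:idx + 1])
--         combinations.append((f'prev_{i}', combined))
--
--     # 向后拼接1-3句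
--     for i in range(1, max_combine + 1):
--         end = min(n, idx + 1 + i)
--         combined = ''.join(segments[idx:end])
--         combinations.append((f'next_{i}', combined))
--
--     # 前后同时拼接
--     for i in range(1, max_combine + 1):
--         for j in range(1, max_combine + 1):
--             start = max(0, idx - i)
--             end = min(n, idx + 1 + j)
--             combined = ''.join(segments[start:end])
--             combinations.append((f'both_{i}_{j}', combined))
--
--     return combinations
-- ===== SOURCE B (Python) =====
-- def get_combined_segments(segments, position, max_combine=3):
--     """获取不同组合的前后句拼接结果"""
--     n = len(segments)
--     idx = position - 1
--     base = segments[idx]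
--     out = [('base', base)]
--     # incremental prefix table: prevs[i-1] == ''.join(segments[max(0, idx-i):idx+1])
--     prevs = []
--     acc = base
--     for i in range(1, max_combine + 1):
--         k = idx - i
--         if k >= 0:
--             acc = segments[k] + acc
--         prevs.append(acc)
--         out.append(('prev_%d' % i, acc))
--     # incremental suffix table: afters[j-1] == ''.join(segments[idx+1:min(n, idx+1+j)])
--     afters = []
--     aft = ''
--     for j in range(1, max_combine + 1):
--         k = idx + j
--         if k < n:
--             aft = aft + segments[k]
--         afters.append(aft)
--         out.append(('next_%d' % j, base + aft))
--     for i in range(1, max_combine + 1):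
--         for j in range(1, max_combine + 1):
--             out.append(('both_%d_%d' % (i, j), prevs[i - 1] + afters[j - 1]))
--     return out
-- ===== Notes on version B (the rewrite author's own statement) =====
-- stated objective: alternative
-- what changed: Instead of re-slicing and re-joining the segment list for every combination, B builds the prev/next concatenations incrementally in two small tables (extending leftward/rightward with clamping) and forms each both_i_j as prevs[i-1] + afters[j-1].
import Mathlib
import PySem

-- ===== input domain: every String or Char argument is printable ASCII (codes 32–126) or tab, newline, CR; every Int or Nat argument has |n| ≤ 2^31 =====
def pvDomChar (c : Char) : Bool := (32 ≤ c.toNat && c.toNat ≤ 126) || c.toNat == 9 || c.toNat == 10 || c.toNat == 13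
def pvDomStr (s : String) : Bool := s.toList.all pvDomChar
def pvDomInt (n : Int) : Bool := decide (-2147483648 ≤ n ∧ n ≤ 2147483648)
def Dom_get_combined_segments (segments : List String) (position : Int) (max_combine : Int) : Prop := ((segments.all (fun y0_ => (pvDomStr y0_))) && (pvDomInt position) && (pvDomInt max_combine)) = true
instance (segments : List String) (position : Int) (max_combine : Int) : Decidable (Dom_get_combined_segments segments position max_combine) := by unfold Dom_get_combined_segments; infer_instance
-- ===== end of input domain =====

-- B replaces A's per-combination slice-and-join passes by two incrementally built
-- prefix/suffix concatenation tables that every emitted combination reuses (objective: alternative).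

-- ===== PORT A =====
def get_combined_segments (segments : List String) (position : Int) (max_combine : Int) : List (String × String) :=
  let n : Int := (segments.length : Int)
  let idx : Int := position - 1
  let base_text : String := PySem.List.pyGetD segments idx ""
  let combinations : List (String × String) := [("base", base_text)]
  let combinations := (PySem.List.pyRange 1 (max_combine + 1)).foldl (fun acc i =>
    let start := max 0 (idx - i)
    let combined := PySem.Str.join "" (PySem.List.slice segments (some start) (some (idx + 1)))
    acc ++ [("prev_" ++ PySem.Int.toStr i, combined)]) combinations
  let combinations := (PySem.List.pyRange 1 (max_combine + 1)).foldl (fun acc i =>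
    let e := min n (idx + 1 + i)
    let combined := PySem.Str.join "" (PySem.List.slice segments (some idx) (some e))
    acc ++ [("next_" ++ PySem.Int.toStr i, combined)]) combinations
  (PySem.List.pyRange 1 (max_combine + 1)).foldl (fun acc i =>
    (PySem.List.pyRange 1 (max_combine + 1)).foldl (fun acc2 j =>
      let start := max 0 (idx - i)
      let e := min n (idx + 1 + j)
      let combined := PySem.Str.join "" (PySem.List.slice segments (some start) (some e))
      acc2 ++ [("both_" ++ PySem.Int.toStr i ++ "_" ++ PySem.Int.toStr j, combined)]) acc) combinations

-- ===== PORT B =====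
def get_combined_segments_alt (segments : List String) (position : Int) (max_combine : Int) : List (String × String) :=
  let n : Int := (segments.length : Int)
  let idx : Int := position - 1
  let base : String := PySem.List.pyGetD segments idx ""
  let out : List (String × String) := [("base", base)]
  let s1 := (PySem.List.pyRange 1 (max_combine + 1)).foldl
    (fun (s : List String × String × List (String × String)) i =>
      let k := idx - i
      let acc := if 0 ≤ k then PySem.List.pyGetD segments k "" ++ s.2.1 else s.2.1
      (s.1 ++ [acc], acc, s.2.2 ++ [("prev_" ++ PySem.Int.toStr i, acc)])) ([], base, out)
  let prevs := s1.1
  let s2 := (PySem.List.pyRange 1 (max_combine + 1)).foldl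
    (fun (s : List String × String × List (String × String)) j =>
      let k := idx + j
      let aft := if k < n then s.2.1 ++ PySem.List.pyGetD segments k "" else s.2.1
      (s.1 ++ [aft], aft, s.2.2 ++ [("next_" ++ PySem.Int.toStr j, base ++ aft)])) ([], "", s1.2.2)
  let afters := s2.1
  (PySem.List.pyRange 1 (max_combine + 1)).foldl (fun o i =>
    (PySem.List.pyRange 1 (max_combine + 1)).foldl (fun o2 j =>
      o2 ++ [("both_" ++ PySem.Int.toStr i ++ "_" ++ PySem.Int.toStr j,
        PySem.List.pyGetD prevs (i - 1) "" ++ PySem.List.pyGetD afters (j - 1) "")]) o) s2.2.2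

-- ===== PRECONDITION & SPEC =====
-- Pre_ restricts to the function's natural 1-based domain 1 ≤ position ≤ len(segments):
-- outside it A either raises IndexError (position > len or position ≤ -len) or, for
-- non-positive positions, returns accidental values of Python's negative-index wraparound
-- (the 'prev_'/'next_' slices then do not even contain the base segment).
def Pre_get_combined_segments (segments : List String) (position : Int) (max_combine : Int) : Prop :=
  1 ≤ position ∧ position ≤ (segments.length : Int)
instance (segments : List String) (position : Int) (max_combine : Int) : Decidable (Pre_get_combined_segments segments position max_combine) := by unfold Pre_get_combined_segments; infer_instance

def pvWitness_get_combined_segments : List String × Int × Int := (["a", "b", "c"], 2, 3)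

def Spec_get_combined_segments (segments : List String) (position : Int) (max_combine : Int) (out : List (String × String)) : Prop := out = get_combined_segments_alt segments position max_combine
instance (segments : List String) (position : Int) (max_combine : Int) (out : List (String × String)) : Decidable (Spec_get_combined_segments segments position max_combine out) := by unfold Spec_get_combined_segments; infer_instance

-- ===== CLAIM (what is proved, stated in full; the proofs are below) =====
def Claim_equal_get_combined_segments : Prop := ∀ (segments : List String) (position : Int) (max_combine : Int), Dom_get_combined_segments segments position max_combine → Pre_get_combined_segments segments position max_combine → Spec_get_combined_segments segments position max_combine (get_combined_segments segments position max_combine)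

-- ===== LEMMAS AND PROOFS =====

-- the prefix concatenation B maintains incrementally (value of B's acc after t iterations)
def prevF (segs : List String) (idx : Int) : Nat → String
  | 0 => PySem.List.pyGetD segs idx ""
  | t + 1 => if 0 ≤ idx - (1 + (t : Int)) then
      PySem.List.pyGetD segs (idx - (1 + (t : Int))) "" ++ prevF segs idx t
    else prevF segs idx t

-- the suffix concatenation B maintains incrementally (value of B's aft after t iterations)
def aftF (segs : List String) (idx : Int) : Nat → String
  | 0 => ""
  | t + 1 => if idx + (1 + (t : Int)) < (segs.length : Int) then
      aftF segs idx t ++ PySem.List.pyGetD segs (idx + (1 + (t : Int))) ""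
    else aftF segs idx t

-- A's per-combination value: join of a clamped slice
def jslice (segs : List String) (a b : Int) : String :=
  PySem.Str.join "" (PySem.List.slice segs (some a) (some b))

theorem join_empty_nil : PySem.Str.join "" ([] : List String) = "" := by
  rw [← String.toList_inj]
  simp [PySem.Str.toList_join, PySem.Chars.join_nil]

theorem join_empty_cons (x : String) (xs : List String) :
    PySem.Str.join "" (x :: xs) = x ++ PySem.Str.join "" xs := by
  rw [← String.toList_inj]
  cases xs with
  | nil => simp [PySem.Str.toList_join, PySem.Chars.join_singleton, PySem.Chars.join_nil,
      String.toList_append]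
  | cons y ys =>
    simp [PySem.Str.toList_join, PySem.Chars.join_cons_cons, String.toList_append]

theorem join_empty_append (xs ys : List String) :
    PySem.Str.join "" (xs ++ ys) = PySem.Str.join "" xs ++ PySem.Str.join "" ys := by
  induction xs with
  | nil => simp [join_empty_nil]
  | cons x xs ih => simp [join_empty_cons, ih, String.append_assoc]

theorem jslice_single (segs : List String) {idx : Int} (h0 : 0 ≤ idx)
    (h1 : idx < (segs.length : Int)) :
    jslice segs idx (idx + 1) = PySem.List.pyGetD segs idx "" := by
  unfold jslice
  rw [PySem.List.slice_toNat segs h0 (by omega)]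
  have hlt : idx.toNat < segs.length := by omega
  have h2 : (idx + 1).toNat - idx.toNat = 1 := by omega
  rw [h2, List.take_one_drop_eq_of_lt_length hlt,
    PySem.List.pyGetD_eq_getElem segs "" h0 h1]
  simp [join_empty_cons, join_empty_nil]

theorem jslice_split (segs : List String) {a c b : Int} (h0 : 0 ≤ a) (h1 : a ≤ c) (h2 : c ≤ b) :
    jslice segs a b = jslice segs a c ++ jslice segs c b := by
  unfold jslice
  rw [PySem.List.slice_toNat segs h0 (by omega), PySem.List.slice_toNat segs h0 (by omega),
    PySem.List.slice_toNat segs (by omega) (by omega)]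
  rw [← join_empty_append]
  congr 1
  have e1 : b.toNat - a.toNat = (c.toNat - a.toNat) + (b.toNat - c.toNat) := by omega
  rw [e1, List.take_add, List.drop_drop]
  have e2 : a.toNat + (c.toNat - a.toNat) = c.toNat := by omega
  rw [e2]

theorem jslice_cons (segs : List String) {a b : Int} (h0 : 0 ≤ a)
    (hb : a < b) (hl : a < (segs.length : Int)) :
    jslice segs a b = PySem.List.pyGetD segs a "" ++ jslice segs (a + 1) b := by
  unfold jslice
  rw [PySem.List.slice_toNat segs h0 (by omega), PySem.List.slice_toNat segs (by omega) (by omega)]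
  have hlt : a.toNat < segs.length := by omega
  rw [List.drop_eq_getElem_cons hlt]
  have e1 : b.toNat - a.toNat = (b.toNat - (a + 1).toNat) + 1 := by omega
  have e2 : (a + 1).toNat = a.toNat + 1 := by omega
  rw [e1, e2, List.take_succ_cons, join_empty_cons,
    PySem.List.pyGetD_eq_getElem segs "" h0 hl]

theorem jslice_snoc (segs : List String) {a b : Int} (h0 : 0 ≤ a)
    (hab : a ≤ b) (hl : b < (segs.length : Int)) :
    jslice segs a (b + 1) = jslice segs a b ++ PySem.List.pyGetD segs b "" := by
  rw [jslice_split segs h0 hab (by omega : b ≤ b + 1), jslice_single segs (by omega) hl]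

theorem prev_eq (segs : List String) {idx : Int} (h0 : 0 ≤ idx) (h1 : idx < (segs.length : Int)) :
    ∀ t : Nat, jslice segs (max 0 (idx - (t : Int))) (idx + 1) = prevF segs idx t := by
  intro t
  induction t with
  | zero =>
    have e : max 0 (idx - ((0 : Nat) : Int)) = idx := by omega
    rw [e, jslice_single segs h0 h1]; rfl
  | succ t ih =>
    show jslice segs (max 0 (idx - ((t : Int) + 1))) (idx + 1) = prevF segs idx (t + 1)
    unfold prevF
    by_cases hk : 0 ≤ idx - (1 + (t : Int))
    · rw [if_pos hk]
      have e1 : max 0 (idx - ((t : Int) + 1)) = idx - (1 + (t : Int)) := by omega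
      have e2 : max 0 (idx - (t : Int)) = idx - (1 + (t : Int)) + 1 := by omega
      rw [e1, jslice_cons segs hk (by omega) (by omega), ← e2, ih]
    · rw [if_neg hk]
      have e1 : max 0 (idx - ((t : Int) + 1)) = 0 := by omega
      have e2 : max 0 (idx - (t : Int)) = 0 := by omega
      rw [e1, ← e2, ih]

theorem aft_eq (segs : List String) {idx : Int} (h0 : 0 ≤ idx) (h1 : idx < (segs.length : Int)) :
    ∀ t : Nat, jslice segs (idx + 1) (min (segs.length : Int) (idx + 1 + (t : Int))) = aftF segs idx t := by
  intro t
  induction t with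
  | zero =>
    have e : min (segs.length : Int) (idx + 1 + ((0 : Nat) : Int)) = idx + 1 := by omega
    rw [e]
    unfold jslice
    rw [PySem.List.slice_toNat segs (by omega) (by omega)]
    simp [join_empty_nil]
    rfl
  | succ t ih =>
    show jslice segs (idx + 1) (min (segs.length : Int) (idx + 1 + ((t : Int) + 1))) = aftF segs idx (t + 1)
    unfold aftF
    by_cases hk : idx + (1 + (t : Int)) < (segs.length : Int)
    · rw [if_pos hk]
      have e1 : min (segs.length : Int) (idx + 1 + ((t : Int) + 1)) = (idx + 1 + (t : Int)) + 1 := by omega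
      have e2 : min (segs.length : Int) (idx + 1 + (t : Int)) = idx + 1 + (t : Int) := by omega
      have e3 : idx + (1 + (t : Int)) = idx + 1 + (t : Int) := by ring
      rw [e1, jslice_snoc segs (by omega) (by omega) (by omega), ← ih, e2, e3]
    · rw [if_neg hk]
      have e1 : min (segs.length : Int) (idx + 1 + ((t : Int) + 1)) = (segs.length : Int) := by omega
      have e2 : min (segs.length : Int) (idx + 1 + (t : Int)) = (segs.length : Int) := by omega
      rw [e1, ← ih, e2]

-- closed form of port A
theorem A_closed (segments : List String) (position : Int) (max_combine : Int) :
    get_combined_segments segments position max_combine =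
      [("base", PySem.List.pyGetD segments (position - 1) "")]
      ++ (List.range max_combine.toNat).map (fun (k : Nat) =>
          ("prev_" ++ PySem.Int.toStr (1 + (k : Int)),
            jslice segments (max 0 ((position - 1) - (1 + (k : Int)))) ((position - 1) + 1)))
      ++ (List.range max_combine.toNat).map (fun (k : Nat) =>
          ("next_" ++ PySem.Int.toStr (1 + (k : Int)),
            jslice segments (position - 1) (min (segments.length : Int) ((position - 1) + 1 + (1 + (k : Int))))))
      ++ (List.range max_combine.toNat).flatMap (fun (ki : Nat) =>
          (List.range max_combine.toNat).map (fun (kj : Nat) =>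
            ("both_" ++ PySem.Int.toStr (1 + (ki : Int)) ++ "_" ++ PySem.Int.toStr (1 + (kj : Int)),
              jslice segments (max 0 ((position - 1) - (1 + (ki : Int))))
                (min (segments.length : Int) ((position - 1) + 1 + (1 + (kj : Int))))))) := by
  unfold get_combined_segments jslice
  simp only [PySem.List.pyRange_one, add_sub_cancel_right, List.foldl_map,
    PySem.List.foldl_append_singleton_eq_map, PySem.List.foldl_append_eq_flatMap,
    List.append_assoc, List.cons_append, List.nil_append]

-- invariant of B's first loop (the prev table)
theorem B_loop1 (segments : List String) (idx : Int) (out0 : List (String × String)) :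
  ∀ t : Nat,
  List.foldl
    (fun (s : List String × String × List (String × String)) i =>
      (s.1 ++ [if 0 ≤ idx - i then PySem.List.pyGetD segments (idx - i) "" ++ s.2.1 else s.2.1],
        if 0 ≤ idx - i then PySem.List.pyGetD segments (idx - i) "" ++ s.2.1 else s.2.1,
        s.2.2 ++ [("prev_" ++ PySem.Int.toStr i,
          if 0 ≤ idx - i then PySem.List.pyGetD segments (idx - i) "" ++ s.2.1 else s.2.1)]))
    ([], PySem.List.pyGetD segments idx "", out0)
    (List.map (fun (k : Nat) => (1 : Int) + ↑k) (List.range t))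
  = ((List.range t).map (fun (k : Nat) => prevF segments idx (k + 1)),
     prevF segments idx t,
     out0 ++ (List.range t).map (fun (k : Nat) => ("prev_" ++ PySem.Int.toStr (1 + (k : Int)), prevF segments idx (k + 1)))) := by
  intro t
  induction t with
  | zero => simp [prevF]
  | succ t ih =>
    rw [List.range_succ]
    simp only [List.map_append, List.foldl_append, ih, List.foldl_cons, List.foldl_nil,
      List.map_cons, List.map_nil, List.append_assoc, prevF]

-- invariant of B's second loop (the after table)
theorem B_loop2 (segments : List String) (idx : Int) (base : String) (out0 : List (String × String)) :
  ∀ t : Nat,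
  List.foldl
    (fun (s : List String × String × List (String × String)) j =>
      (s.1 ++ [if idx + j < (segments.length : Int) then s.2.1 ++ PySem.List.pyGetD segments (idx + j) "" else s.2.1],
        if idx + j < (segments.length : Int) then s.2.1 ++ PySem.List.pyGetD segments (idx + j) "" else s.2.1,
        s.2.2 ++ [("next_" ++ PySem.Int.toStr j,
          base ++ if idx + j < (segments.length : Int) then s.2.1 ++ PySem.List.pyGetD segments (idx + j) "" else s.2.1)]))
    ([], "", out0)
    (List.map (fun (k : Nat) => (1 : Int) + ↑k) (List.range t))
  = ((List.range t).map (fun (k : Nat) => aftF segments idx (k + 1)),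
     aftF segments idx t,
     out0 ++ (List.range t).map (fun (k : Nat) => ("next_" ++ PySem.Int.toStr (1 + (k : Int)), base ++ aftF segments idx (k + 1)))) := by
  intro t
  induction t with
  | zero => simp [aftF]
  | succ t ih =>
    rw [List.range_succ]
    simp only [List.map_append, List.foldl_append, ih, List.foldl_cons, List.foldl_nil,
      List.map_cons, List.map_nil, List.append_assoc, aftF]

-- closed form of port B
theorem B_closed (segments : List String) (position : Int) (max_combine : Int) :
    get_combined_segments_alt segments position max_combine =
      [("base", prevF segments (position - 1) 0)]
      ++ (List.range max_combine.toNat).map (fun (k : Nat) =>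
          ("prev_" ++ PySem.Int.toStr (1 + (k : Int)), prevF segments (position - 1) (k + 1)))
      ++ (List.range max_combine.toNat).map (fun (k : Nat) =>
          ("next_" ++ PySem.Int.toStr (1 + (k : Int)),
            prevF segments (position - 1) 0 ++ aftF segments (position - 1) (k + 1)))
      ++ (List.range max_combine.toNat).flatMap (fun (ki : Nat) =>
          (List.range max_combine.toNat).map (fun (kj : Nat) =>
            ("both_" ++ PySem.Int.toStr (1 + (ki : Int)) ++ "_" ++ PySem.Int.toStr (1 + (kj : Int)),
              prevF segments (position - 1) (ki + 1) ++ aftF segments (position - 1) (kj + 1)))) := by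
  unfold get_combined_segments_alt
  simp only [PySem.List.pyRange_one, add_sub_cancel_right]
  rw [B_loop1 segments (position - 1) [("base", PySem.List.pyGetD segments (position - 1) "")] max_combine.toNat]
  rw [B_loop2 segments (position - 1) (PySem.List.pyGetD segments (position - 1) "")]
  simp only [List.foldl_map, PySem.List.foldl_append_singleton_eq_map,
    PySem.List.foldl_append_eq_flatMap, List.append_assoc, List.cons_append, List.nil_append]
  show _ = ("base", prevF segments (position - 1) 0) :: _
  rw [show PySem.List.pyGetD segments (position - 1) "" = prevF segments (position - 1) 0 from rfl]
  congr 1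
  congr 1
  congr 1
  rw [List.flatMap_def, List.flatMap_def]
  congr 1
  apply List.map_congr_left
  intro ki hki
  apply List.map_congr_left
  intro kj hkj
  have hki' : ki < max_combine.toNat := List.mem_range.mp hki
  have hkj' : kj < max_combine.toNat := List.mem_range.mp hkj
  have eki : (1 : Int) + (ki : Int) - 1 = ((ki : Int)) := by omega
  have ekj : (1 : Int) + (kj : Int) - 1 = ((kj : Int)) := by omega
  rw [eki, ekj, PySem.List.pyGetD_natCast, PySem.List.pyGetD_natCast,
    PySem.List.getD_map_range _ _ _ _ hki', PySem.List.getD_map_range _ _ _ _ hkj']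

-- ===== VERDICT (by name: the statement is the Claim_ definition above) =====
set_option maxHeartbeats 1000000 in
theorem get_combined_segments_spec : Claim_equal_get_combined_segments := by
  intro segments position max_combine _ hpre
  unfold Spec_get_combined_segments
  obtain ⟨hp1, hp2⟩ := hpre
  have h0 : 0 ≤ position - 1 := by omega
  have hl : position - 1 < (segments.length : Int) := by omega
  have hprev : ∀ k : Nat,
      jslice segments (max 0 ((position - 1) - (1 + (k : Int)))) ((position - 1) + 1)
        = prevF segments (position - 1) (k + 1) := by
    intro k
    have e : (position - 1) - (1 + (k : Int)) = (position - 1) - (((k + 1 : Nat)) : Int) := by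
      push_cast; ring
    rw [e]
    exact prev_eq segments h0 hl (k + 1)
  have haft : ∀ k : Nat,
      jslice segments ((position - 1) + 1)
          (min (segments.length : Int) ((position - 1) + 1 + (1 + (k : Int))))
        = aftF segments (position - 1) (k + 1) := by
    intro k
    have e : (position - 1) + 1 + (1 + (k : Int)) = (position - 1) + 1 + (((k + 1 : Nat)) : Int) := by
      push_cast; ring
    rw [e]
    exact aft_eq segments h0 hl (k + 1)
  rw [A_closed, B_closed,
    show prevF segments (position - 1) 0 = PySem.List.pyGetD segments (position - 1) "" from rfl]
  congr 1
  · congr 1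
    · congr 1
      · apply List.map_congr_left
        intro k _
        rw [hprev k]
    · apply List.map_congr_left
      intro k _
      have hmin : (position - 1) + 1 ≤ min (segments.length : Int) ((position - 1) + 1 + (1 + (k : Int))) := by
        omega
      rw [jslice_split segments h0 (by omega) hmin, jslice_single segments h0 hl, haft k]
  rw [List.flatMap_def, List.flatMap_def]
  congr 1
  apply List.map_congr_left
  intro ki _
  apply List.map_congr_left
  intro kj _
  have hmin : (position - 1) + 1 ≤ min (segments.length : Int) ((position - 1) + 1 + (1 + (kj : Int))) := by
    omega
  have hmax0 : (0 : Int) ≤ max 0 ((position - 1) - (1 + (ki : Int))) := le_max_left _ _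
  have hmaxle : max 0 ((position - 1) - (1 + (ki : Int))) ≤ (position - 1) + 1 := by omega
  rw [jslice_split segments hmax0 hmaxle hmin, hprev ki, haft kj]
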